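-- pv_equiv track=rewrite | github.com/hlevente96/Advent_Of_Code | 2024/day2.py | count_safe_rows
-- ===== SOURCE A (Python) =====
-- def is_safe(row: list) -> bool:
--     inc = all(1 <= row[i + 1] - row[i] <= 3 for i in range(len(row) - 1))
--     dec = all(1 <= row[i] - row[i + 1] <= 3 for i in range(len(row) - 1))
--     return inc or dec
--
-- def count_safe_rows(rows: list, dampener: bool) -> int:
--     safe_rows = 0
--     for row in rows:
--         if dampener:
--             if is_safe_with_dampener(row):
--                 safe_rows += 1
--         else:
--             if is_safe(row):
--                 safe_rows += 1
--     return safe_rows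
--
-- def is_safe_with_dampener(row):
--     if is_safe(row):
--         return True
--     for i in range(len(row)):
--         modified_row = row[:i] + row[i + 1:]
--         if is_safe(modified_row):
--             return True
--     return False
-- ===== SOURCE B (Python) =====
-- def _first_bad(row, lo, hi):
--     # index of the first adjacent pair whose difference is outside [lo, hi], or None
--     for k in range(len(row) - 1):
--         d = row[k + 1] - row[k]
--         if not (lo <= d <= hi):
--             return k
--     return None
--
-- def _dir_safe(row, lo, hi, dampener):
--     j = _first_bad(row, lo, hi)
--     if j is None:
--         return True
--     if not dampener:
--         return False
--     # only removing an element of the first bad pair can ever help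
--     return (_first_bad(row[:j] + row[j + 1:], lo, hi) is None
--             or _first_bad(row[:j + 1] + row[j + 2:], lo, hi) is None)
--
-- def count_safe_rows(rows, dampener):
--     return sum(1 for row in rows
--                if _dir_safe(row, 1, 3, dampener) or _dir_safe(row, -3, -1, dampener))
-- ===== Notes on version B (the rewrite author's own statement) =====
-- stated objective: alternative
-- what changed: A's dampener tries removing every index and rechecks the whole row each time; B makes one pass per direction to find the first out-of-range adjacent difference and rechecks only the two removals touching that pair, counting rows with a filter (asymptotically fewer rechecks per row, not confirmed faster in a timing run at the generated sizes).
import Mathlib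
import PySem

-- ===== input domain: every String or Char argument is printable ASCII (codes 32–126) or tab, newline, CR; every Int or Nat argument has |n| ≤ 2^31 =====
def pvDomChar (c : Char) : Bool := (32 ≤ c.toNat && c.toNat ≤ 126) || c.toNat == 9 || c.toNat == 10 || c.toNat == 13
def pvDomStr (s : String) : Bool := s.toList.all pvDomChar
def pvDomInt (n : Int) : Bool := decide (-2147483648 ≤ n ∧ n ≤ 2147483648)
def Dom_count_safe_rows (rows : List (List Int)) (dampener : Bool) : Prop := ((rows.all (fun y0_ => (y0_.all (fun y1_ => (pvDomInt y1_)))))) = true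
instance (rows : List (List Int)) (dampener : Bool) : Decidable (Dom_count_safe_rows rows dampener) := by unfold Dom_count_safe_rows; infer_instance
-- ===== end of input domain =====

-- B replaces A's try-every-removal dampener scan per row by a single pass that finds the
-- first bad adjacent difference and retries only the two removals that can repair it
-- (an alternative algorithm; not measured faster at the generated input sizes).

-- ===== PORT A =====
-- is_safe: all(1 <= row[i+1]-row[i] <= 3) or all(1 <= row[i]-row[i+1] <= 3) over range(len(row)-1)
def isSafeA (row : List Int) : Bool :=
  let inc := (PySem.List.pyRange 0 ((row.length : Int) - 1) 1).all (fun i =>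
    decide (1 ≤ PySem.List.pyGetD row (i + 1) 0 - PySem.List.pyGetD row i 0 ∧
            PySem.List.pyGetD row (i + 1) 0 - PySem.List.pyGetD row i 0 ≤ 3))
  let dec := (PySem.List.pyRange 0 ((row.length : Int) - 1) 1).all (fun i =>
    decide (1 ≤ PySem.List.pyGetD row i 0 - PySem.List.pyGetD row (i + 1) 0 ∧
            PySem.List.pyGetD row i 0 - PySem.List.pyGetD row (i + 1) 0 ≤ 3))
  inc || dec

-- is_safe_with_dampener: is_safe(row) or some i in range(len(row)) with is_safe(row[:i]+row[i+1:])
def isSafeDampA (row : List Int) : Bool :=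
  if isSafeA row then true
  else (PySem.List.pyRange 0 (row.length : Int) 1).any (fun i =>
    isSafeA (PySem.List.slice row none (some i) ++ PySem.List.slice row (some (i + 1)) none))

def count_safe_rows (rows : List (List Int)) (dampener : Bool) : Int :=
  rows.foldl (fun safe_rows row =>
    if dampener then (if isSafeDampA row then safe_rows + 1 else safe_rows)
    else (if isSafeA row then safe_rows + 1 else safe_rows)) 0

-- ===== PORT B =====
-- _first_bad: index of the first adjacent pair whose difference is outside [lo, hi], or none
def firstBad (lo hi : Int) : List Int → Option Nat
  | a :: b :: t =>
      if lo ≤ b - a ∧ b - a ≤ hi then (firstBad lo hi (b :: t)).map (· + 1) else some 0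
  | _ => none

-- _dir_safe: safe in one direction, retrying only the two removals touching the first bad pair
def dirSafe (row : List Int) (lo hi : Int) (dampener : Bool) : Bool :=
  match firstBad lo hi row with
  | none => true
  | some j =>
      if !dampener then false
      else (firstBad lo hi (row.take j ++ row.drop (j + 1)) == none) ||
           (firstBad lo hi (row.take (j + 1) ++ row.drop (j + 2)) == none)

def count_safe_rows_alt (rows : List (List Int)) (dampener : Bool) : Int :=
  ((rows.filter (fun row => dirSafe row 1 3 dampener || dirSafe row (-3) (-1) dampener)).length : Int)

-- ===== PRECONDITION & SPEC =====
def Spec_count_safe_rows (rows : List (List Int)) (dampener : Bool) (out : Int) : Prop := out = count_safe_rows_alt rows dampener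
instance (rows : List (List Int)) (dampener : Bool) (out : Int) : Decidable (Spec_count_safe_rows rows dampener out) := by unfold Spec_count_safe_rows; infer_instance

-- ===== CLAIM (what is proved, stated in full; the proofs are below) =====
def Claim_equal_count_safe_rows : Prop := ∀ (rows : List (List Int)) (dampener : Bool), Dom_count_safe_rows rows dampener → Spec_count_safe_rows rows dampener (count_safe_rows rows dampener)

-- ===== LEMMAS AND PROOFS =====

-- all adjacent differences of l lie in [lo, hi]
def PairsOk (lo hi : Int) (l : List Int) : Prop :=
  ∀ k : Nat, (h : k + 1 < l.length) → lo ≤ l[k + 1] - l[k] ∧ l[k + 1] - l[k] ≤ hi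

theorem pairsOk_cons_cons (lo hi a b : Int) (t : List Int) :
    PairsOk lo hi (a :: b :: t) ↔ (lo ≤ b - a ∧ b - a ≤ hi) ∧ PairsOk lo hi (b :: t) := by
  constructor
  · intro h
    refine ⟨h 0 (by simp), ?_⟩
    intro k hk
    have := h (k + 1) (by simpa using Nat.succ_lt_succ hk)
    simpa using this
  · rintro ⟨h0, h⟩ k hk
    cases k with
    | zero => simpa using h0
    | succ k => simpa using h k (by simpa using Nat.lt_of_succ_lt_succ hk)

theorem pairsOk_short (lo hi : Int) (l : List Int) (h : l.length ≤ 1) : PairsOk lo hi l := by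
  intro k hk; omega

theorem firstBad_none_iff (lo hi : Int) (l : List Int) :
    firstBad lo hi l = none ↔ PairsOk lo hi l := by
  induction l with
  | nil => simpa [firstBad] using pairsOk_short lo hi [] (by simp)
  | cons a t ih =>
    cases t with
    | nil => simpa [firstBad] using pairsOk_short lo hi [a] (by simp)
    | cons b t' =>
      rw [pairsOk_cons_cons]
      unfold firstBad
      by_cases hp : lo ≤ b - a ∧ b - a ≤ hi
      · rw [if_pos hp]
        simp [ih, hp]
      · rw [if_neg hp]
        exact ⟨fun h => (Option.some_ne_none 0 h).elim, fun h => absurd h.1 hp⟩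

theorem firstBad_some_spec (lo hi : Int) (l : List Int) (j : Nat)
    (h : firstBad lo hi l = some j) :
    ∃ hlt : j + 1 < l.length,
      ¬(lo ≤ l[j + 1]'hlt - l[j]'(by omega) ∧ l[j + 1]'hlt - l[j]'(by omega) ≤ hi) := by
  induction l generalizing j with
  | nil => simp [firstBad] at h
  | cons a t ih =>
    cases t with
    | nil => simp [firstBad] at h
    | cons b t' =>
      unfold firstBad at h
      by_cases hp : lo ≤ b - a ∧ b - a ≤ hi
      · rw [if_pos hp] at h
        rw [Option.map_eq_some_iff] at h
        obtain ⟨j', hj', rfl⟩ := h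
        obtain ⟨hlt, hbad⟩ := ih j' hj'
        exact ⟨by simpa using Nat.succ_lt_succ hlt, by simpa using hbad⟩
      · rw [if_neg hp] at h
        cases h
        exact ⟨by simp, by simpa using hp⟩

theorem pairsOk_eraseIdx_false (lo hi : Int) (l : List Int) (j i : Nat)
    (hj : firstBad lo hi l = some j) (hilt : i < l.length) (h1 : i ≠ j) (h2 : i ≠ j + 1) :
    ¬ PairsOk lo hi (l.eraseIdx i) := by
  obtain ⟨hlt, hbad⟩ := firstBad_some_spec lo hi l j hj
  have hlen : (l.eraseIdx i).length = l.length - 1 := by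
    rw [List.length_eraseIdx]; simp [hilt]
  rcases Nat.lt_trichotomy i j with hij | rfl | hij
  · -- i < j: the bad pair survives at positions (j-1, j)
    obtain ⟨m, rfl⟩ : ∃ m, j = i + m + 1 := ⟨j - i - 1, by omega⟩
    intro hp
    have hk : (i + m) + 1 < (l.eraseIdx i).length := by omega
    have := hp (i + m) hk
    rw [List.getElem_eraseIdx, List.getElem_eraseIdx] at this
    rw [dif_neg (by omega : ¬ i + m < i), dif_neg (by omega : ¬ i + m + 1 < i)] at this
    exact hbad this
  · exact absurd rfl h1
  · -- j < i, i ≠ j+1 hence j+1 < i: the bad pair survives at positions (j, j+1)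
    have hji : j + 1 < i := by omega
    intro hp
    have hk : j + 1 < (l.eraseIdx i).length := by omega
    have := hp j hk
    rw [List.getElem_eraseIdx, List.getElem_eraseIdx] at this
    rw [dif_pos (by omega : j < i), dif_pos hji] at this
    exact hbad this

-- bridge: A's all-over-range(len-1) check is PairsOk
theorem pyAll_pairs (row : List Int) (p : Int → Int → Bool) :
    ((PySem.List.pyRange 0 ((row.length : Int) - 1) 1).all (fun i =>
        p (PySem.List.pyGetD row i 0) (PySem.List.pyGetD row (i + 1) 0)) = true)
      ↔ ∀ k : Nat, (h : k + 1 < row.length) → p row[k] (row[k + 1]'h) = true := by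
  rw [List.all_eq_true]
  constructor
  · intro h k hk
    have hk1 : k < row.length := by omega
    have hmem : (k : Int) ∈ PySem.List.pyRange 0 ((row.length : Int) - 1) 1 :=
      (PySem.List.mem_pyRange_one).mpr ⟨by positivity, by omega⟩
    have := h _ hmem
    rw [show ((k : Int) + 1) = ((k + 1 : Nat) : Int) by push_cast; ring] at this
    rw [PySem.List.pyGetD_natCast, PySem.List.pyGetD_natCast] at this
    rwa [List.getD_eq_getElem row 0 hk1, List.getD_eq_getElem row 0 hk] at this
  · intro h i hi
    obtain ⟨h0, hlt⟩ := (PySem.List.mem_pyRange_one).mp hi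
    obtain ⟨k, rfl⟩ : ∃ k : Nat, i = (k : Int) := ⟨i.toNat, by omega⟩
    have hk : k + 1 < row.length := by omega
    have hk1 : k < row.length := by omega
    rw [show ((k : Int) + 1) = ((k + 1 : Nat) : Int) by push_cast; ring]
    rw [PySem.List.pyGetD_natCast, PySem.List.pyGetD_natCast]
    rw [List.getD_eq_getElem row 0 hk1, List.getD_eq_getElem row 0 hk]
    exact h k hk

theorem isSafeA_iff (row : List Int) :
    isSafeA row = true ↔ (PairsOk 1 3 row ∨ PairsOk (-3) (-1) row) := by
  unfold isSafeA
  rw [Bool.or_eq_true]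
  apply or_congr
  · rw [pyAll_pairs row (fun a b => decide (1 ≤ b - a ∧ b - a ≤ 3))]
    constructor
    · intro h k hk
      have := h k hk
      rw [decide_eq_true_iff] at this
      omega
    · intro h k hk
      rw [decide_eq_true_iff]
      have := h k hk
      omega
  · rw [pyAll_pairs row (fun a b => decide (1 ≤ a - b ∧ a - b ≤ 3))]
    constructor
    · intro h k hk
      have := h k hk
      rw [decide_eq_true_iff] at this
      omega
    · intro h k hk
      rw [decide_eq_true_iff]
      have := h k hk
      omega

theorem sliceErase (row : List Int) (i : Int) (h0 : 0 ≤ i) :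
    PySem.List.slice row none (some i) ++ PySem.List.slice row (some (i + 1)) none
      = row.eraseIdx i.toNat := by
  rw [PySem.List.slice_to row h0, PySem.List.slice_from row (by omega : (0:Int) ≤ i + 1)]
  rw [show (i + 1).toNat = i.toNat + 1 by omega]
  rw [List.eraseIdx_eq_take_drop_succ]

theorem anyA_iff (row : List Int) :
    ((PySem.List.pyRange 0 (row.length : Int) 1).any (fun i =>
        isSafeA (PySem.List.slice row none (some i) ++ PySem.List.slice row (some (i + 1)) none)) = true)
      ↔ ∃ k : Nat, k < row.length ∧ isSafeA (row.eraseIdx k) = true := by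
  rw [List.any_eq_true]
  constructor
  · rintro ⟨i, hi, hsafe⟩
    obtain ⟨h0, hlt⟩ := (PySem.List.mem_pyRange_one).mp hi
    rw [sliceErase row i h0] at hsafe
    exact ⟨i.toNat, by omega, hsafe⟩
  · rintro ⟨k, hk, hsafe⟩
    refine ⟨(k : Int), (PySem.List.mem_pyRange_one).mpr ⟨by positivity, by omega⟩, ?_⟩
    rw [sliceErase row (k : Int) (by positivity)]
    simpa using hsafe

theorem isSafeDampA_iff (row : List Int) :
    isSafeDampA row = true
      ↔ (isSafeA row = true ∨
          ((PySem.List.pyRange 0 (row.length : Int) 1).any (fun i =>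
            isSafeA (PySem.List.slice row none (some i) ++
              PySem.List.slice row (some (i + 1)) none)) = true)) := by
  unfold isSafeDampA
  cases h : isSafeA row
  · simp [h]
  · simp [h]

theorem dirSafe_false_iff (row : List Int) (lo hi : Int) :
    dirSafe row lo hi false = true ↔ PairsOk lo hi row := by
  rcases hfb : firstBad lo hi row with _ | j
  · simp [dirSafe, hfb]
    exact (firstBad_none_iff lo hi row).mp hfb
  · simp [dirSafe, hfb]
    intro hp
    obtain ⟨hlt, hbad⟩ := firstBad_some_spec lo hi row j hfb
    exact hbad (hp j hlt)

theorem dirSafe_true_iff (row : List Int) (lo hi : Int) :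
    dirSafe row lo hi true = true
      ↔ (PairsOk lo hi row ∨ ∃ k : Nat, k < row.length ∧ PairsOk lo hi (row.eraseIdx k)) := by
  rcases hfb : firstBad lo hi row with _ | j
  · simp [dirSafe, hfb]
    exact Or.inl ((firstBad_none_iff lo hi row).mp hfb)
  · obtain ⟨hlt, hbad⟩ := firstBad_some_spec lo hi row j hfb
    simp only [dirSafe, hfb, Bool.not_true, Bool.false_eq_true, if_false, Bool.or_eq_true,
      beq_iff_eq]
    rw [← List.eraseIdx_eq_take_drop_succ row j,
        show j + 2 = (j + 1) + 1 from rfl,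
        ← List.eraseIdx_eq_take_drop_succ row (j + 1)]
    rw [firstBad_none_iff, firstBad_none_iff]
    constructor
    · rintro (h | h)
      · exact Or.inr ⟨j, by omega, h⟩
      · exact Or.inr ⟨j + 1, by omega, h⟩
    · rintro (h | ⟨k, hk, hkok⟩)
      · exact absurd (h j hlt) hbad
      · by_cases hkj : k = j
        · subst hkj; exact Or.inl hkok
        · by_cases hkj1 : k = j + 1
          · subst hkj1; exact Or.inr hkok
          · exact absurd hkok (pairsOk_eraseIdx_false lo hi row j k hfb hk hkj hkj1)

theorem row_eq (row : List Int) (d : Bool) :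
    (if d then isSafeDampA row else isSafeA row)
      = (dirSafe row 1 3 d || dirSafe row (-3) (-1) d) := by
  cases d with
  | false =>
    simp only [if_neg Bool.false_ne_true]
    rw [Bool.eq_iff_iff, Bool.or_eq_true, isSafeA_iff, dirSafe_false_iff, dirSafe_false_iff]
  | true =>
    rw [Bool.eq_iff_iff, Bool.or_eq_true, dirSafe_true_iff, dirSafe_true_iff]
    show isSafeDampA row = true ↔ _
    rw [isSafeDampA_iff, anyA_iff]
    constructor
    · rintro (hs | ⟨k, hk, hsafe⟩)
      · rcases (isSafeA_iff row).mp hs with h | h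
        · exact Or.inl (Or.inl h)
        · exact Or.inr (Or.inl h)
      · rcases (isSafeA_iff _).mp hsafe with h | h
        · exact Or.inl (Or.inr ⟨k, hk, h⟩)
        · exact Or.inr (Or.inr ⟨k, hk, h⟩)
    · rintro ((h | ⟨k, hk, h⟩) | (h | ⟨k, hk, h⟩))
      · exact Or.inl ((isSafeA_iff row).mpr (Or.inl h))
      · exact Or.inr ⟨k, hk, (isSafeA_iff _).mpr (Or.inl h)⟩
      · exact Or.inl ((isSafeA_iff row).mpr (Or.inr h))
      · exact Or.inr ⟨k, hk, (isSafeA_iff _).mpr (Or.inr h)⟩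

theorem count_foldl (p : List Int → Bool) (rows : List (List Int)) (c : Int) :
    rows.foldl (fun acc row => if p row then acc + 1 else acc) c
      = c + ((rows.filter p).length : Int) := by
  induction rows generalizing c with
  | nil => simp
  | cons r t ih =>
    simp only [List.foldl_cons, List.filter_cons]
    by_cases hp : p r = true
    · rw [if_pos hp, if_pos hp, ih]
      push_cast [List.length_cons]
      ring
    · rw [if_neg hp, if_neg hp, ih]

-- ===== VERDICT (by name: the statement is the Claim_ definition above) =====
theorem count_safe_rows_spec : Claim_equal_count_safe_rows := by
  intro rows dampener _
  unfold Spec_count_safe_rows count_safe_rows count_safe_rows_alt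
  have hfun : (fun (acc : Int) (row : List Int) =>
      if dampener then (if isSafeDampA row then acc + 1 else acc)
      else (if isSafeA row then acc + 1 else acc))
      = (fun (acc : Int) (row : List Int) =>
        if (dirSafe row 1 3 dampener || dirSafe row (-3) (-1) dampener) then acc + 1 else acc) := by
    funext acc row
    rw [← row_eq row dampener]
    cases dampener <;> rfl
  rw [hfun, count_foldl]
  simp
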